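-- pv_equiv track=rewrite | github.com/ifo20/football-project | fixtures.py | teams_can_play
-- ===== SOURCE A (Python) =====
-- def teams_can_play(matchday, home, away):
-- 	already_playing = set()
-- 	for scheduled_fixture in matchday:
-- 		existing_home, existing_away = scheduled_fixture
-- 		already_playing.add(existing_home)
-- 		already_playing.add(existing_away)
-- 	# we know who is already scheduled to play on this matchday
-- 	if home in already_playing or away in already_playing:
-- 		return False
-- 	return True
-- ===== SOURCE B (Python) =====
-- def _found(teams, x):
-- 	# binary search (bisect_left by hand) in the sorted list `teams`
-- 	lo, hi = 0, len(teams)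
-- 	while lo < hi:
-- 		mid = (lo + hi) // 2
-- 		if teams[mid] < x:
-- 			lo = mid + 1
-- 		else:
-- 			hi = mid
-- 	return lo < len(teams) and teams[lo] == x
--
-- def teams_can_play(matchday, home, away):
-- 	teams = sorted(t for fixture in matchday for t in fixture)
-- 	return not (_found(teams, home) or _found(teams, away))
-- ===== Notes on version B (the rewrite author's own statement) =====
-- stated objective: alternative
-- what changed: B flattens the fixtures into one team list, sorts it once, and decides each membership question by a hand-written binary search, instead of A's build-a-hash-set-then-lookup pass.
import Mathlib
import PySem

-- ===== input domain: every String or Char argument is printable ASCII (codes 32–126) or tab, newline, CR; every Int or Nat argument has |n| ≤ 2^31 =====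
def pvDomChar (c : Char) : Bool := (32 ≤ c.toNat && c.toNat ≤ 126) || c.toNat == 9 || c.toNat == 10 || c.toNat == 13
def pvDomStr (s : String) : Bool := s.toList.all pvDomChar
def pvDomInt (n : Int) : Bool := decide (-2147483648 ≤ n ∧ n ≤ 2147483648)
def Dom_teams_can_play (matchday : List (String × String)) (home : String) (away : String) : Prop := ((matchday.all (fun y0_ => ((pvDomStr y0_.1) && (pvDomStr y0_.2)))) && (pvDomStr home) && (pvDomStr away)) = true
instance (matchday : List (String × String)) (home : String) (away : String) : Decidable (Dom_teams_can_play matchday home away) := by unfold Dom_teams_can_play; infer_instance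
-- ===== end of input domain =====

-- B flattens the fixtures, sorts the team list once and answers each membership query by binary search, instead of A's set-build-then-lookup (alternative algorithm, same asymptotic class for one query).


-- ===== PORT A =====
def teams_can_play (matchday : List (String × String)) (home : String) (away : String) : Bool :=
  let already_playing : PySem.Set String :=
    matchday.foldl (fun s f => PySem.Set.add (PySem.Set.add s f.1) f.2) PySem.Set.empty
  if PySem.Set.contains already_playing home || PySem.Set.contains already_playing away then
    false
  else
    true

-- ===== PORT B =====
-- hand-written bisect_left loop of Source B's _found; teams[mid] is always in range
-- (0 ≤ lo ≤ mid < hi ≤ len), so List.getD is exact for the Python indexing here.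
def pvFoundLoop (teams : List String) (x : String) (lo hi : Nat) : Nat :=
  if lo < hi then
    let mid := (lo + hi) / 2
    if teams.getD mid "" < x then pvFoundLoop teams x (mid + 1) hi
    else pvFoundLoop teams x lo mid
  else lo
termination_by hi - lo
decreasing_by all_goals omega

def pvFound (teams : List String) (x : String) : Bool :=
  let lo := pvFoundLoop teams x 0 teams.length
  decide (lo < teams.length) && (teams.getD lo "" == x)

def teams_can_play_alt (matchday : List (String × String)) (home : String) (away : String) : Bool :=
  let teams := PySem.List.sorted (matchday.flatMap (fun fixture => [fixture.1, fixture.2])) (fun t => t) false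
  !(pvFound teams home || pvFound teams away)

-- ===== PRECONDITION & SPEC =====
def Spec_teams_can_play (matchday : List (String × String)) (home : String) (away : String) (out : Bool) : Prop := out = teams_can_play_alt matchday home away
instance (matchday : List (String × String)) (home : String) (away : String) (out : Bool) : Decidable (Spec_teams_can_play matchday home away out) := by unfold Spec_teams_can_play; infer_instance

-- ===== CLAIM (what is proved, stated in full; the proofs are below) =====
def Claim_equal_teams_can_play : Prop := ∀ (matchday : List (String × String)) (home : String) (away : String), Dom_teams_can_play matchday home away → Spec_teams_can_play matchday home away (teams_can_play matchday home away)

-- ===== LEMMAS AND PROOFS =====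

/-- Membership in A's accumulated set. -/
theorem mem_fold_set (matchday : List (String × String)) (s : PySem.Set String) (x : String) :
    (x ∈ matchday.foldl (fun s f => PySem.Set.add (PySem.Set.add s f.1) f.2) s) ↔
      x ∈ s ∨ ∃ f ∈ matchday, x = f.1 ∨ x = f.2 := by
  induction matchday generalizing s with
  | nil => simp
  | cons f rest ih =>
    simp only [List.foldl_cons, ih, PySem.Set.mem_add, List.mem_cons]
    constructor
    · rintro (((h | h) | h) | ⟨g, hg, hx⟩)
      · exact Or.inl h
      · exact Or.inr ⟨f, Or.inl rfl, Or.inl h⟩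
      · exact Or.inr ⟨f, Or.inl rfl, Or.inr h⟩
      · exact Or.inr ⟨g, Or.inr hg, hx⟩
    · rintro (h | ⟨g, rfl | hg, hx⟩)
      · exact Or.inl (Or.inl (Or.inl h))
      · rcases hx with h | h
        · exact Or.inl (Or.inl (Or.inr h))
        · exact Or.inl (Or.inr h)
      · exact Or.inr ⟨g, hg, hx⟩

/-- A returns true iff neither team occurs in any scheduled fixture. -/
theorem teams_can_play_true_iff (matchday : List (String × String)) (home away : String) :
    teams_can_play matchday home away = true ↔
      ¬ ∃ f ∈ matchday, home = f.1 ∨ home = f.2 ∨ away = f.1 ∨ away = f.2 := by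
  by_cases h : (PySem.Set.contains (matchday.foldl (fun s f => PySem.Set.add (PySem.Set.add s f.1) f.2) PySem.Set.empty) home
      || PySem.Set.contains (matchday.foldl (fun s f => PySem.Set.add (PySem.Set.add s f.1) f.2) PySem.Set.empty) away) = true
  · rw [show teams_can_play matchday home away = false by simp only [teams_can_play]; rw [if_pos h]]
    refine iff_of_false (by decide) (not_not_intro ?_)
    simp only [Bool.or_eq_true, PySem.Set.contains_iff, mem_fold_set] at h
    simp at h
    rcases h with ⟨a, b, hab, hx⟩ | ⟨a, b, hab, hx⟩ <;> exact ⟨(a, b), hab, by tauto⟩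
  · rw [show teams_can_play matchday home away = true by simp only [teams_can_play]; rw [if_neg h]]
    simp only [Bool.or_eq_true, PySem.Set.contains_iff, mem_fold_set, not_or] at h
    simp at h
    refine iff_of_true rfl ?_
    rintro ⟨g, hg, hx | hx | hx | hx⟩
    · exact (h.1 g.1 g.2 hg).1 hx
    · exact (h.1 g.1 g.2 hg).2 hx
    · exact (h.2 g.1 g.2 hg).1 hx
    · exact (h.2 g.1 g.2 hg).2 hx

/-- Invariant of the binary-search loop: the returned index separates the strings below x
    from those not below x. -/
theorem pvFoundLoop_spec (teams : List String) (x : String)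
    (hsort : ∀ i j, i < j → j < teams.length → teams.getD i "" ≤ teams.getD j "") :
    ∀ fuel lo hi, hi - lo ≤ fuel → lo ≤ hi → hi ≤ teams.length →
      (∀ i, i < lo → teams.getD i "" < x) →
      (∀ i, hi ≤ i → i < teams.length → x ≤ teams.getD i "") →
      (∀ i, i < pvFoundLoop teams x lo hi → teams.getD i "" < x) ∧
      (∀ i, pvFoundLoop teams x lo hi ≤ i → i < teams.length → x ≤ teams.getD i "") ∧
      pvFoundLoop teams x lo hi ≤ teams.length := by
  intro fuel
  induction fuel with
  | zero =>
    intro lo hi hfuel hle hhi hlow hhigh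
    have : hi = lo := by omega
    subst this
    rw [pvFoundLoop]
    simp only [lt_irrefl, if_false]
    exact ⟨hlow, hhigh, hhi⟩
  | succ n ih =>
    intro lo hi hfuel hle hhi hlow hhigh
    rw [pvFoundLoop]
    by_cases hlt : lo < hi
    · simp only [hlt, if_true]
      set mid := (lo + hi) / 2 with hmid
      have hmlo : lo ≤ mid := by omega
      have hmhi : mid < hi := by omega
      by_cases hc : teams.getD mid "" < x
      · simp only [hc, if_true]
        refine ih (mid + 1) hi (by omega) (by omega) hhi ?_ hhigh
        intro i hi'
        rcases lt_or_ge i lo with h | h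
        · exact hlow i h
        · rcases eq_or_lt_of_le (Nat.lt_succ_iff.mp hi') with rfl | h2
          · exact hc
          · exact lt_of_le_of_lt (hsort i mid h2 (by omega)) hc
      · simp only [hc, if_false]
        refine ih lo mid (by omega) (by omega) (by omega) hlow ?_
        intro i hmi hil
        rcases eq_or_lt_of_le hmi with rfl | h2
        · exact le_of_not_gt hc
        · exact le_trans (le_of_not_gt hc) (hsort mid i h2 hil)
    · simp only [hlt, if_false]
      have : hi = lo := by omega
      exact ⟨hlow, fun i h1 h2 => hhigh i (by omega) h2, by omega⟩

/-- Binary search decides membership in a sorted list. -/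
theorem pvFound_iff (teams : List String) (x : String)
    (hsort : ∀ i j, i < j → j < teams.length → teams.getD i "" ≤ teams.getD j "") :
    pvFound teams x = true ↔ x ∈ teams := by
  unfold pvFound
  obtain ⟨h1, h2, h3⟩ := pvFoundLoop_spec teams x hsort (teams.length) 0 teams.length
    (by omega) (by omega) le_rfl (by omega) (fun i h1 h2 => absurd h1 (by omega))
  set r := pvFoundLoop teams x 0 teams.length with hr
  simp only [Bool.and_eq_true, decide_eq_true_eq, beq_iff_eq]
  constructor
  · rintro ⟨hrl, hre⟩
    rw [← hre, List.getD_eq_getElem teams _ hrl]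
    exact List.getElem_mem hrl
  · intro hx
    obtain ⟨j, hj, hje⟩ := List.mem_iff_getElem.mp hx
    have hjd : teams.getD j "" = x := by rw [List.getD_eq_getElem teams _ hj]; exact hje
    have hjr : r ≤ j := by
      by_contra h
      exact absurd hjd (ne_of_lt (h1 j (by omega)))
    have hrl : r < teams.length := by omega
    refine ⟨hrl, le_antisymm ?_ ?_⟩
    · rcases eq_or_lt_of_le hjr with rfl | h
      · exact le_of_eq hjd
      · calc teams.getD r "" ≤ teams.getD j "" := hsort r j h hj
          _ = x := hjd
    · exact h2 r le_rfl hrl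

/-- B returns true iff neither team occurs in any scheduled fixture. -/
theorem teams_can_play_alt_true_iff (matchday : List (String × String)) (home away : String) :
    teams_can_play_alt matchday home away = true ↔
      ¬ ∃ f ∈ matchday, home = f.1 ∨ home = f.2 ∨ away = f.1 ∨ away = f.2 := by
  unfold teams_can_play_alt
  set flat := matchday.flatMap (fun fixture => [fixture.1, fixture.2]) with hflat
  have hsort : ∀ i j, i < j → j < (PySem.List.sorted flat (fun t => t) false).length →
      (PySem.List.sorted flat (fun t => t) false).getD i "" ≤ (PySem.List.sorted flat (fun t => t) false).getD j "" := by
    have hp := PySem.List.sorted_pairwise flat (fun t => t)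
    rw [List.pairwise_iff_getElem] at hp
    intro i j hij hj
    rw [List.getD_eq_getElem _ _ (by omega), List.getD_eq_getElem _ _ hj]
    exact hp i j (by omega) hj hij
  have hmem : ∀ y, y ∈ PySem.List.sorted flat (fun t => t) false ↔ ∃ f ∈ matchday, y = f.1 ∨ y = f.2 := by
    intro y
    rw [PySem.List.mem_sorted, hflat, List.mem_flatMap]
    constructor
    · rintro ⟨f, hf, hy⟩
      simp at hy
      exact ⟨f, hf, by tauto⟩
    · rintro ⟨f, hf, hy⟩
      exact ⟨f, hf, by simp; tauto⟩
  set teams := PySem.List.sorted flat (fun t => t) false with hteams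
  simp only [Bool.not_eq_true', Bool.or_eq_false_iff]
  constructor
  · rintro ⟨hh, ha⟩ ⟨f, hf, hx⟩
    rcases hx with hx | hx | hx | hx
    · exact absurd ((pvFound_iff teams home hsort).mpr ((hmem home).mpr ⟨f, hf, Or.inl hx⟩)) (by simp [hh])
    · exact absurd ((pvFound_iff teams home hsort).mpr ((hmem home).mpr ⟨f, hf, Or.inr hx⟩)) (by simp [hh])
    · exact absurd ((pvFound_iff teams away hsort).mpr ((hmem away).mpr ⟨f, hf, Or.inl hx⟩)) (by simp [ha])
    · exact absurd ((pvFound_iff teams away hsort).mpr ((hmem away).mpr ⟨f, hf, Or.inr hx⟩)) (by simp [ha])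
  · intro h
    constructor
    · cases hfh : pvFound teams home
      · rfl
      · obtain ⟨f, hf, hx⟩ := (hmem home).mp ((pvFound_iff teams home hsort).mp hfh)
        exact absurd ⟨f, hf, by tauto⟩ h
    · cases hfa : pvFound teams away
      · rfl
      · obtain ⟨f, hf, hx⟩ := (hmem away).mp ((pvFound_iff teams away hsort).mp hfa)
        exact absurd ⟨f, hf, by tauto⟩ h

-- ===== VERDICT (by name: the statement is the Claim_ definition above) =====
theorem teams_can_play_spec : Claim_equal_teams_can_play := by
  intro matchday home away _
  unfold Spec_teams_can_play
  rw [Bool.eq_iff_iff, teams_can_play_true_iff, teams_can_play_alt_true_iff]
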